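-- pv_equiv track=rewrite | github.com/FelipeSizilio/Atividade-Grafos | Grafos/GrafoListaArestaNaoImplementado.py | grau_vertices
-- ===== SOURCE A (Python) =====
-- def grau_vertices(vertices, arestas):
--
--     graus = {}
--
--     for vertice in vertices:
--         grau_entrada = 0
--         grau_saida = 0
--
--         for aresta in arestas:
--             origem, destino = aresta
--
--             if origem == vertice:
--                 grau_saida += 1
--             if destino == vertice:
--                 grau_entrada += 1
--
--         graus[vertice] = {
--             'entrada': grau_entrada,
--             'saida': grau_saida,
--             'total': grau_entrada + grau_saida
--         }
--
--     return graus
-- ===== SOURCE B (Python) =====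
-- def grau_vertices(vertices, arestas):
--     # Project the edge list onto its two endpoint columns, count each column
--     # once, then build one record per distinct vertex and assemble the dict
--     # from the finished pair list.
--     def conta(xs):
--         c = {}
--         for x in xs:
--             c[x] = c.get(x, 0) + 1
--         return c
--
--     saida = conta([origem for origem, _ in arestas])
--     entrada = conta([destino for _, destino in arestas])
--
--     pares = [(v, {'entrada': entrada.get(v, 0),
--                   'saida': saida.get(v, 0),
--                   'total': entrada.get(v, 0) + saida.get(v, 0)})
--              for v in dict.fromkeys(vertices)]
--     return dict(pares)
-- ===== Notes on version B (the rewrite author's own statement) =====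
-- stated objective: faster
-- what changed: Instead of rescanning the whole edge list once per vertex, B counts each endpoint column of the edge list once into frequency dicts and then assembles the result dict from a pair list over the deduplicated vertices.
import Mathlib
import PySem

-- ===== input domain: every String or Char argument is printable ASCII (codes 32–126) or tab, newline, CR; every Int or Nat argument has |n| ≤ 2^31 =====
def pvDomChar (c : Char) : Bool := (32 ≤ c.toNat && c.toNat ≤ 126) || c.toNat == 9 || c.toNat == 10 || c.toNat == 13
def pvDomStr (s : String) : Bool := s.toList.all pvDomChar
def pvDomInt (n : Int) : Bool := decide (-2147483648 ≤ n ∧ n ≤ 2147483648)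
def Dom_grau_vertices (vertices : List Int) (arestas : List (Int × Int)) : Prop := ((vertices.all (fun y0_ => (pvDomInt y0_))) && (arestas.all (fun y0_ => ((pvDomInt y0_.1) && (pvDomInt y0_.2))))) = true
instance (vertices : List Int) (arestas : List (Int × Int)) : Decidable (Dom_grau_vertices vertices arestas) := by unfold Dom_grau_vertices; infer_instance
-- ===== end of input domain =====

-- B replaces A's per-vertex rescan of all edges by counting each endpoint
-- column of the edge list once and assembling the dict from a pair list
-- over the deduplicated vertices (objective: faster, asymptotic).

-- ===== PORT A =====
-- for aresta in arestas: origem, destino = aresta; if origem == v: saida += 1; if destino == v: entrada += 1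
def grauVerticesInner (v : Int) (arestas : List (Int × Int)) : Int × Int :=
  arestas.foldl
    (fun (es : Int × Int) (aresta : Int × Int) =>
      let es := if aresta.1 = v then (es.1, es.2 + 1) else es
      if aresta.2 = v then (es.1 + 1, es.2) else es)
    (0, 0)

def grau_vertices (vertices : List Int) (arestas : List (Int × Int)) : List (Int × List (String × Int)) :=
  (vertices.foldl
    (fun (graus : PySem.Dict Int (List (String × Int))) (vertice : Int) =>
      let es := grauVerticesInner vertice arestas
      graus.insert vertice [("entrada", es.1), ("saida", es.2), ("total", es.1 + es.2)])
    PySem.Dict.empty).items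

-- ===== PORT B =====
-- def conta(xs): c = {}; for x in xs: c[x] = c.get(x, 0) + 1; return c
def contaGrau (xs : List Int) : PySem.Dict Int Int :=
  xs.foldl (fun c x => c.insert x (c.getD x 0 + 1)) PySem.Dict.empty

def grau_vertices_alt (vertices : List Int) (arestas : List (Int × Int)) : List (Int × List (String × Int)) :=
  (PySem.Dict.ofList ((PySem.List.dedup vertices).map (fun v =>
    (v, [("entrada", (contaGrau (arestas.map (fun a => a.2))).getD v 0),
         ("saida", (contaGrau (arestas.map (fun a => a.1))).getD v 0),
         ("total", (contaGrau (arestas.map (fun a => a.2))).getD v 0 +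
                   (contaGrau (arestas.map (fun a => a.1))).getD v 0)])))).items

-- ===== PRECONDITION & SPEC =====
def Spec_grau_vertices (vertices : List Int) (arestas : List (Int × Int)) (out : List (Int × List (String × Int))) : Prop := out = grau_vertices_alt vertices arestas
instance (vertices : List Int) (arestas : List (Int × Int)) (out : List (Int × List (String × Int))) : Decidable (Spec_grau_vertices vertices arestas out) := by unfold Spec_grau_vertices; infer_instance

-- ===== CLAIM =====
def Claim_equal_grau_vertices : Prop := ∀ (vertices : List Int) (arestas : List (Int × Int)), Dom_grau_vertices vertices arestas → Spec_grau_vertices vertices arestas (grau_vertices vertices arestas)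

-- ===== LEMMAS AND PROOFS =====

-- A's inner loop counts incoming and outgoing edges of v.
theorem grauVerticesInner_eq (v : Int) (arestas : List (Int × Int)) :
    grauVerticesInner v arestas =
      (((arestas.map Prod.snd).count v : Int), ((arestas.map Prod.fst).count v : Int)) := by
  unfold grauVerticesInner
  suffices h : ∀ (l : List (Int × Int)) (e s : Int),
      l.foldl (fun (es : Int × Int) (aresta : Int × Int) =>
        let es := if aresta.1 = v then (es.1, es.2 + 1) else es
        if aresta.2 = v then (es.1 + 1, es.2) else es) (e, s)
      = (e + ((l.map Prod.snd).count v : Int), s + ((l.map Prod.fst).count v : Int)) by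
    simpa using h arestas 0 0
  intro l
  induction l with
  | nil => intro e s; simp
  | cons a t ih =>
    intro e s
    rw [List.foldl_cons]
    have hstep : (let es := if a.1 = v then ((e, s).1, (e, s).2 + 1) else (e, s);
        if a.2 = v then (es.1 + 1, es.2) else es)
        = (e + if a.2 = v then 1 else 0, s + if a.1 = v then 1 else 0) := by
      by_cases h1 : a.1 = v <;> by_cases h2 : a.2 = v <;> simp [h1, h2]
    rw [hstep, ih]
    rw [Prod.ext_iff]
    constructor <;> simp only [List.map_cons, List.count_cons, beq_iff_eq] <;>
      split_ifs <;> push_cast <;> omega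

-- B's counters hold exactly those counts.
theorem contaGrau_getD (xs : List Int) (v : Int) :
    (contaGrau xs).getD v 0 = (xs.count v : Int) := by
  unfold contaGrau
  rw [PySem.Dict.foldl_insert_getD_add_one_eq_counter, PySem.Dict.getD_counter]

-- Folding 'insert v (g v)' over xs yields the dict keyed by xs's first
-- occurrences, each mapped through g (the value depends only on the key).
theorem foldl_insert_fun_eq (g : Int → List (String × Int)) (xs acc : List Int) :
    xs.foldl (fun d v => d.insert v (g v))
      (PySem.Dict.mk ((PySem.Set.ofList acc).map (fun v => (v, g v))))
    = PySem.Dict.mk ((PySem.Set.ofList (acc ++ xs)).map (fun v => (v, g v))) := by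
  induction xs generalizing acc with
  | nil => simp
  | cons v t ih =>
    rw [List.foldl_cons]
    have hstep : (PySem.Dict.mk ((PySem.Set.ofList acc).map (fun v => (v, g v)))).insert v (g v)
        = PySem.Dict.mk ((PySem.Set.ofList (acc ++ [v])).map (fun v => (v, g v))) := by
      rw [PySem.Set.ofList_append_singleton]
      by_cases hv : v ∈ acc
      · have hmem : v ∈ PySem.Set.ofList acc := (PySem.Set.mem_ofList _ _).2 hv
        rw [PySem.Set.add_of_mem hmem]
        unfold PySem.Dict.insert PySem.Dict.contains
        have hany : ((PySem.Set.ofList acc).map (fun v => (v, g v))).any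
            (fun p => p.1 == v) = true := by
          simp only [List.any_map, List.any_eq_true, Function.comp]
          exact ⟨v, hmem, by simp⟩
        simp only [hany, if_true]
        congr 1
        rw [List.map_map]
        apply List.map_congr_left
        intro k _
        by_cases hk : k = v
        · simp [Function.comp, hk]
        · simp [Function.comp, hk]
      · have hmem : v ∉ PySem.Set.ofList acc := fun h => hv ((PySem.Set.mem_ofList _ _).1 h)
        rw [PySem.Set.add_of_not_mem hmem]
        unfold PySem.Dict.insert PySem.Dict.contains
        have hany : ((PySem.Set.ofList acc).map (fun v => (v, g v))).any
            (fun p => p.1 == v) = false := by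
          simp only [List.any_map, List.any_eq_false, Function.comp]
          intro k hk
          simp only [beq_iff_eq]
          exact fun h => hmem (h ▸ hk)
        simp [hany]
    rw [hstep, ih (acc ++ [v]), List.append_assoc]
    rfl

-- ===== VERDICT (by name: the statement is the Claim_ definition above) =====
theorem grau_vertices_spec : Claim_equal_grau_vertices := by
  intro vertices arestas _
  unfold Spec_grau_vertices grau_vertices grau_vertices_alt
  -- canonical per-vertex record
  set g : Int → List (String × Int) := fun v =>
    [("entrada", ((arestas.map Prod.snd).count v : Int)),
     ("saida", ((arestas.map Prod.fst).count v : Int)),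
     ("total", ((arestas.map Prod.snd).count v : Int) + ((arestas.map Prod.fst).count v : Int))] with hg
  -- A's side: the fold is 'insert v (g v)'
  have hA : (vertices.foldl
      (fun (graus : PySem.Dict Int (List (String × Int))) (vertice : Int) =>
        let es := grauVerticesInner vertice arestas
        graus.insert vertice [("entrada", es.1), ("saida", es.2), ("total", es.1 + es.2)])
      PySem.Dict.empty)
      = vertices.foldl (fun d v => d.insert v (g v)) PySem.Dict.empty := by
    apply PySem.List.foldl_congr_mem
    intro d v _
    simp only [grauVerticesInner_eq, hg]
  -- B's side: the pair list is 'map (fun v => (v, g v))' over the dedup list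
  have hB : ((PySem.List.dedup vertices).map (fun v =>
        (v, [("entrada", (contaGrau (arestas.map (fun a => a.2))).getD v 0),
             ("saida", (contaGrau (arestas.map (fun a => a.1))).getD v 0),
             ("total", (contaGrau (arestas.map (fun a => a.2))).getD v 0 +
                       (contaGrau (arestas.map (fun a => a.1))).getD v 0)])))
      = (PySem.Set.ofList vertices).map (fun v => (v, g v)) := by
    rw [PySem.List.dedup_eq_ofList]
    apply List.map_congr_left
    intro v _
    simp only [contaGrau_getD, hg]
  rw [hA, hB]
  -- both dicts are the fold of 'insert v (g v)' over a vertex list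
  have hfold : ∀ xs : List Int,
      xs.foldl (fun d v => d.insert v (g v)) PySem.Dict.empty
      = PySem.Dict.mk ((PySem.Set.ofList xs).map (fun v => (v, g v))) := by
    intro xs
    have := foldl_insert_fun_eq g xs []
    simpa using this
  rw [hfold vertices]
  -- B: dict(pares) is the same fold over the deduplicated vertices
  have hofList : PySem.Dict.ofList ((PySem.Set.ofList vertices).map (fun v => (v, g v)))
      = PySem.Dict.mk ((PySem.Set.ofList vertices).map (fun v => (v, g v))) := by
    unfold PySem.Dict.ofList PySem.Dict.update
    rw [List.foldl_map]
    have := hfold (PySem.Set.ofList vertices)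
    rw [PySem.Set.ofList_ofList] at this
    exact this
  rw [hofList]
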